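-- pv_equiv track=rewrite | github.com/irene8941/Python-CodingTest | StringCompression.py | solution
-- ===== SOURCE A (Python) =====
-- def solution(s):
--     answer = len(s)
--     # 문자 1개 단위(step)부터 압축 단위를 늘려가며 확인
--     for step in range(1, len(s) // 2 + 1):
--         comp = ""       # 압축된 문자열 변수 초기화
--         prev = s[:step] # 앞에서부터 step만큼의 문자열 추출
--         count = 1       # 압축 횟수 초기화
--         # 단위(step) 크기만큼 증가시키며 이전 문자열과 비교
--         for j in range(step, len(s), step):
--             # 이전 문자열과 동일하다면 압축 횟수(count) 증가
--             if prev == s[j : j + step]: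
--                 count += 1
--             # 이전 문자열과 상이하다면(더 이상 압축하지 못하는 경우)
--             else:
--                 comp += str(count) + prev if count >= 2 else prev   # 문자열 압축
--                 count = 1                                           # 압축 횟수 초기화
--                 prev = s[j : j + step]                              # 다음 문자열로 상태 초기화
--         # 남아있는 문자열에 대하여 압축
--         comp += str(count) + prev if count >= 2 else prev
--         # 만들어지는 압축 문자열 중 길이가 가장 짧은 문자열이 정답
--         answer = min(answer, len(comp))
--     return answer
-- ===== SOURCE B (Python) =====
-- def solution(s):
--     n = len(s)
--     best = n
--     for step in range(1, n // 2 + 1):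
--         chunks = [s[i:i + step] for i in range(0, n, step)]
--         m = len(chunks)
--         # cut positions: before the first chunk, after each adjacent mismatch, after the last chunk
--         cuts = [-1] + [t for t in range(m - 1) if chunks[t] != chunks[t + 1]] + [m - 1]
--         # a run of k >= 2 equal chunks (each of full size `step`) saves (k-1)*step - len(str(k))
--         saved = sum((b - a - 1) * step - len(str(b - a))
--                     for a, b in zip(cuts, cuts[1:]) if b - a >= 2)
--         best = min(best, n - saved)
--     return best
-- ===== Notes on version B (the rewrite author's own statement) =====
-- stated objective: alternative
-- what changed: Instead of run-length-encoding (A's prev/count state machine building the compressed string), B computes for each block size the list of mismatch cut positions between adjacent chunks, derives run lengths as pairwise differences of the cut list, and returns n minus the total savings ((k-1)*step - len(str(k)) per run of k>=2 equal full-size chunks); it never builds the compressed string.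
import Mathlib
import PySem

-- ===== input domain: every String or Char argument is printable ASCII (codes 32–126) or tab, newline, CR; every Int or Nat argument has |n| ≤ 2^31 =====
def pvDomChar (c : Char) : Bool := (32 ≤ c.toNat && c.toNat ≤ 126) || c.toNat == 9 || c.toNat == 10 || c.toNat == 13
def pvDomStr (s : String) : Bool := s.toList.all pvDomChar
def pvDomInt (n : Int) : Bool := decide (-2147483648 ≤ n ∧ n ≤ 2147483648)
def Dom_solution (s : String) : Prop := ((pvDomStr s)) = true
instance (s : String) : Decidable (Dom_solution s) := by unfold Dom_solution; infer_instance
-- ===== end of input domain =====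

-- B replaces A's prev/count run-length-encoding state machine by a cut-position computation:
-- per block size it lists the positions where adjacent chunks differ and subtracts, from n, the
-- savings derived from pairwise differences of that cut list; it never builds the compressed
-- string (objective: alternative; a timing run measured B faster at the largest sizes).

-- ===== PORT A =====
-- `comp += str(count) + prev if count >= 2 else prev`
def encA (count : Int) (p : List Char) : List Char :=
  if count ≥ 2 then PySem.Int.toChars count ++ p else p

def solution (s : String) : Int :=
  let cs := s.toList
  (PySem.List.pyRange 1 (PySem.Int.floordiv (cs.length : Int) 2 + 1) 1).foldl
    (fun answer step =>
      -- inner loop over j = step, 2*step, …; state (comp, prev, count)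
      let st := (PySem.List.pyRange step (cs.length : Int) step).foldl
        (fun (st : List Char × List Char × Int) j =>
          if st.2.1 = PySem.List.slice cs (some j) (some (j + step)) then
            (st.1, st.2.1, st.2.2 + 1)
          else
            (st.1 ++ encA st.2.2 st.2.1, PySem.List.slice cs (some j) (some (j + step)), (1 : Int)))
        (([] : List Char), PySem.List.slice cs none (some step), (1 : Int))
      min answer (((st.1 ++ encA st.2.2 st.2.1).length : Int)))
    ((cs.length : Int))

-- ===== PORT B =====
def solution_alt (s : String) : Int :=
  let cs := s.toList
  let n : Int := (cs.length : Int)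
  (PySem.List.pyRange 1 (PySem.Int.floordiv n 2 + 1) 1).foldl
    (fun best step =>
      -- chunks = [s[i:i+step] for i in range(0, n, step)]
      let chunks := (PySem.List.pyRange 0 n step).map
        (fun i => PySem.List.slice cs (some i) (some (i + step)))
      let m : Int := (chunks.length : Int)
      -- cuts = [-1] + [t for t in range(m-1) if chunks[t] != chunks[t+1]] + [m-1]
      let cuts : List Int := -1 ::
        ((PySem.List.pyRange 0 (m - 1) 1).filter
          (fun t => decide (¬ PySem.List.pyGet? chunks t = PySem.List.pyGet? chunks (t + 1)))
         ++ [m - 1])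
      -- saved = sum((b-a-1)*step - len(str(b-a)) for a, b in zip(cuts, cuts[1:]) if b-a >= 2)
      let saved : Int := (((cuts.zip cuts.tail).filter (fun p => decide (p.2 - p.1 ≥ 2))).map
        (fun p => (p.2 - p.1 - 1) * step - ((PySem.Int.toChars (p.2 - p.1)).length : Int))).sum
      min best (n - saved))
    n

-- ===== PRECONDITION & SPEC =====
def Spec_solution (s : String) (out : Int) : Prop := out = solution_alt s
instance (s : String) (out : Int) : Decidable (Spec_solution s out) := by unfold Spec_solution; infer_instance

-- ===== CLAIM (what is proved, stated in full; the proofs are below) =====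
def Claim_equal_solution : Prop := ∀ (s : String), Dom_solution s → Spec_solution s (solution s)

-- ===== LEMMAS AND PROOFS =====

-- A's inner-loop body applied to the chunk it slices (to view the index fold as a chunk fold)
def stepC (st : List Char × List Char × Int) (c : List Char) : List Char × List Char × Int :=
  if st.2.1 = c then (st.1, st.2.1, st.2.2 + 1)
  else (st.1 ++ encA st.2.2 st.2.1, c, (1 : Int))

-- number of leading elements of the list equal to `head`
def leadRun (head : List Char) : List (List Char) → Nat
  | [] => 0
  | c :: rest => if c = head then leadRun head rest + 1 else 0

-- encoded length of one run: len(chunk) + (len(str(k)) if k >= 2 else 0)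
def encLen (p : List Char) (k : Nat) : Int :=
  (p.length : Int) + (if 2 ≤ k then ((PySem.Int.toChars (k : Int)).length : Int) else 0)

-- length of the run-length encoding of a chunk list (recursion on runs)
def compressedLen : List (List Char) → Int
  | [] => 0
  | c :: rest =>
    encLen c (leadRun c rest + 1) + compressedLen (rest.drop (leadRun c rest))
termination_by l => l.length
decreasing_by simp [List.length_drop]

-- positions t with l[t] ≠ l[t+1]
def mism : List (List Char) → List Nat
  | [] => []
  | [_] => []
  | c :: c' :: rest => (if c = c' then [] else [0]) ++ (mism (c' :: rest)).map (· + 1)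

-- B's savings sum, pair by pair, carrying the previous cut position
def psum (step : Int) (a : Int) : List Int → Int
  | [] => 0
  | b :: rest =>
    (if b - a ≥ 2 then (b - a - 1) * step - ((PySem.Int.toChars (b - a)).length : Int) else 0)
      + psum step b rest

-- total length of the chunks
def tlen : List (List Char) → Int
  | [] => 0
  | c :: rest => (c.length : Int) + tlen rest

theorem encA_len (k : Nat) (p : List Char) :
    ((encA ((k : Int) + 1) p).length : Int) = encLen p (k + 1) := by
  unfold encA encLen
  rcases Nat.eq_zero_or_pos k with hk | hk
  · subst hk; norm_num
  · have h2 : ((k : Int) + 1) ≥ 2 := by omega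
    have h2' : 2 ≤ k + 1 := by omega
    have hc : ((k : Int) + 1) = (((k + 1 : Nat)) : Int) := by push_cast; ring
    rw [if_pos h2, if_pos h2', hc]
    simp only [List.length_append, Nat.cast_add]
    ring

-- main invariant for A: the length of A's compressed output over a chunk list, started with
-- count = k+1 copies of prev already seen, is comp's length plus the run-recursion value
theorem key (l : List (List Char)) : ∀ (comp prev : List Char) (k : Nat),
    (((l.foldl stepC (comp, prev, (k : Int) + 1)).1
        ++ encA (l.foldl stepC (comp, prev, (k : Int) + 1)).2.2
                (l.foldl stepC (comp, prev, (k : Int) + 1)).2.1).length : Int)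
      = (comp.length : Int) + encLen prev (k + 1 + leadRun prev l)
          + compressedLen (l.drop (leadRun prev l)) := by
  induction l with
  | nil =>
    intro comp prev k
    simp only [List.foldl_nil, List.drop_nil, List.length_append, Nat.cast_add, encA_len,
      show leadRun prev [] = 0 from rfl, Nat.add_zero]
    rw [compressedLen]
    ring_nf
  | cons c rest ih =>
    intro comp prev k
    by_cases h : prev = c
    · subst h
      have hs : stepC (comp, prev, (k : Int) + 1) prev = (comp, prev, ((k + 1 : Nat) : Int) + 1) := by
        simp [stepC]
      have hl : leadRun prev (prev :: rest) = leadRun prev rest + 1 := by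
        simp [leadRun]
      rw [List.foldl_cons, hs, ih comp prev (k + 1), hl, List.drop_succ_cons,
        show k + 1 + (leadRun prev rest + 1) = k + 1 + 1 + leadRun prev rest from by omega]
    · have hs : stepC (comp, prev, (k : Int) + 1) c
          = (comp ++ encA ((k : Int) + 1) prev, c, ((0 : Nat) : Int) + 1) := by
        simp [stepC, h]
      rw [List.foldl_cons, hs, ih (comp ++ encA ((k : Int) + 1) prev) c 0,
        show leadRun prev (c :: rest) = 0 by simp [leadRun, Ne.symm h],
        List.drop_zero, compressedLen]
      simp only [List.length_append, Nat.cast_add, encA_len]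
      ring_nf

-- range(a, b, s) with positive step and a < b starts with a
theorem pyRange_cons_of_pos (a b s : Int) (hs : 0 < s) (hab : a < b) :
    PySem.List.pyRange a b s = a :: PySem.List.pyRange (a + s) b s := by
  rw [PySem.List.pyRange_of_pos a b hs, PySem.List.pyRange_of_pos (a + s) b hs, if_pos hab]
  have hdiv : (b - a + s - 1) / s = (b - (a + s) + s - 1) / s + 1 := by
    have h : b - a + s - 1 = (b - (a + s) + s - 1) + 1 * s := by ring
    rw [h, Int.add_mul_ediv_right _ _ (by omega)]
  by_cases h2 : a + s < b
  · have hnn : 0 ≤ (b - (a + s) + s - 1) / s := Int.ediv_nonneg (by omega) (by omega)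
    rw [if_pos h2, hdiv,
      show ((b - (a + s) + s - 1) / s + 1).toNat = ((b - (a + s) + s - 1) / s).toNat + 1 from by omega,
      List.range_succ_eq_map]
    simp only [List.map_cons, List.map_map, Nat.cast_zero, mul_zero, add_zero]
    congr 1
    apply List.map_congr_left
    intro k _
    simp only [Function.comp_apply, Nat.succ_eq_add_one]
    push_cast; ring
  · have h0 : (b - (a + s) + s - 1) / s = 0 :=
      Int.ediv_eq_zero_of_lt (by omega) (by omega)
    rw [if_neg h2, hdiv, h0]
    simp

-- per-step agreement on the A side: A's compressed length equals the run recursion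
theorem step_agree (cs : List Char) (step : Int) (h1 : 1 ≤ step) (h2 : step < (cs.length : Int)) :
    (let st := (PySem.List.pyRange step (cs.length : Int) step).foldl
        (fun (st : List Char × List Char × Int) j =>
          if st.2.1 = PySem.List.slice cs (some j) (some (j + step)) then
            (st.1, st.2.1, st.2.2 + 1)
          else
            (st.1 ++ encA st.2.2 st.2.1, PySem.List.slice cs (some j) (some (j + step)), (1 : Int)))
        (([] : List Char), PySem.List.slice cs none (some step), (1 : Int))
     ((st.1 ++ encA st.2.2 st.2.1).length : Int))
    = compressedLen ((PySem.List.pyRange 0 (cs.length : Int) step).map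
        (fun i => PySem.List.slice cs (some i) (some (i + step)))) := by
  have hchunks : (PySem.List.pyRange 0 (cs.length : Int) step).map
        (fun i => PySem.List.slice cs (some i) (some (i + step)))
      = PySem.List.slice cs none (some step)
        :: (PySem.List.pyRange step (cs.length : Int) step).map
             (fun i => PySem.List.slice cs (some i) (some (i + step))) := by
    rw [pyRange_cons_of_pos 0 (cs.length : Int) step (by omega) (by omega), List.map_cons,
      zero_add, PySem.List.slice_zero_start]
  have hfold : (PySem.List.pyRange step (cs.length : Int) step).foldl
        (fun (st : List Char × List Char × Int) j =>
          if st.2.1 = PySem.List.slice cs (some j) (some (j + step)) then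
            (st.1, st.2.1, st.2.2 + 1)
          else
            (st.1 ++ encA st.2.2 st.2.1, PySem.List.slice cs (some j) (some (j + step)), (1 : Int)))
        (([] : List Char), PySem.List.slice cs none (some step), (1 : Int))
      = ((PySem.List.pyRange step (cs.length : Int) step).map
          (fun i => PySem.List.slice cs (some i) (some (i + step)))).foldl stepC
          (([] : List Char), PySem.List.slice cs none (some step), ((0 : Nat) : Int) + 1) := by
    rw [List.foldl_map]
    rfl
  simp only [Nat.cast_zero, zero_add] at hfold
  rw [hchunks, compressedLen]
  have hk := key ((PySem.List.pyRange step (cs.length : Int) step).map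
      (fun i => PySem.List.slice cs (some i) (some (i + step)))) []
      (PySem.List.slice cs none (some step)) 0
  simp only [Nat.cast_zero, zero_add, List.length_nil] at hk
  rw [hfold, hk, Nat.add_comm 1]
-- zip-filter-map-sum over the cut list = pairwise recursion carrying the previous cut
theorem zipsum (step : Int) : ∀ (xs : List Int) (a : Int),
    ((((a :: xs).zip xs).filter (fun p => decide (p.2 - p.1 ≥ 2))).map
        (fun p => (p.2 - p.1 - 1) * step - ((PySem.Int.toChars (p.2 - p.1)).length : Int))).sum
      = psum step a xs := by
  intro xs
  induction xs with
  | nil => intro a; simp [psum]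
  | cons b r ih =>
    intro a
    rw [psum]
    simp only [List.zip_cons_cons, List.filter_cons]
    by_cases h : b - a ≥ 2
    · simp [h, ih b]
    · simp [h, ih b]

-- the filtered index list of the port = `mism`, on the Nat side
theorem natFilt (l : List (List Char)) :
    (List.range (l.length - 1)).filter (fun t => decide (¬ l[t]? = l[t + 1]?))
      = mism l := by
  induction l with
  | nil => simp [mism]
  | cons c rest ih =>
    cases rest with
    | nil => simp [mism]
    | cons c' rest' =>
      rw [mism]
      simp only [List.length_cons, Nat.add_sub_cancel] at ih ⊢
      rw [List.range_succ_eq_map, List.filter_cons, List.filter_map]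
      have hcomp : ((fun t => decide (¬ (c :: c' :: rest')[t]? = (c :: c' :: rest')[t + 1]?))
            ∘ Nat.succ) = (fun t => decide (¬ (c' :: rest')[t]? = (c' :: rest')[t + 1]?)) := by
        funext t
        simp [Function.comp, List.getElem?_cons_succ]
      rw [hcomp, ih]
      by_cases h : c = c'
      · simp [h]
      · simp [h]

theorem leadRun_le (c : List Char) (rest : List (List Char)) : leadRun c rest ≤ rest.length := by
  induction rest with
  | nil => simp [leadRun]
  | cons c' r ih =>
    rw [leadRun]
    split_ifs
    · simp; omega
    · simp

theorem take_leadRun (c : List Char) (rest : List (List Char)) :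
    rest.take (leadRun c rest) = List.replicate (leadRun c rest) c := by
  induction rest with
  | nil => simp [leadRun]
  | cons c' r ih =>
    rw [leadRun]
    split_ifs with h
    · rw [List.take_succ_cons, List.replicate_succ, h, ih]
    · simp

-- mism of a cons, expressed through the leading run
theorem mism_cons (rest : List (List Char)) : ∀ (c : List Char),
    mism (c :: rest) = if leadRun c rest < rest.length then
      leadRun c rest :: (mism (rest.drop (leadRun c rest))).map (· + (leadRun c rest + 1))
    else [] := by
  induction rest with
  | nil => intro c; simp [mism, leadRun]
  | cons c' rest' ih =>
    intro c
    by_cases h : c' = c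
    · subst h
      rw [mism, if_pos rfl, List.nil_append, ih c',
        show leadRun c' (c' :: rest') = leadRun c' rest' + 1 from by simp [leadRun]]
      by_cases h' : leadRun c' rest' < rest'.length
      · rw [if_pos h', if_pos (by simpa using Nat.succ_lt_succ h'), List.map_cons,
          List.map_map, List.drop_succ_cons]
        have hf : ((fun x => x + 1) ∘ fun x => x + (leadRun c' rest' + 1))
            = (fun x => x + (leadRun c' rest' + 1 + 1)) := by
          funext x; simp [Function.comp]; omega
        rw [hf]
      · rw [if_neg h', List.map_nil,
          if_neg (by simp only [List.length_cons]; omega)]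
    · rw [mism, if_neg (fun he => h he.symm),
        show leadRun c (c' :: rest') = 0 from by simp [leadRun, h],
        if_pos (by simp), List.drop_zero]
      rfl

theorem tlen_replicate (k : Nat) (c : List Char) :
    tlen (List.replicate k c) = (k : Int) * (c.length : Int) := by
  induction k with
  | zero => simp [tlen]
  | succ k ih =>
    rw [List.replicate_succ, tlen, ih]
    push_cast
    ring

theorem tlen_append (xs ys : List (List Char)) : tlen (xs ++ ys) = tlen xs + tlen ys := by
  induction xs with
  | nil => simp [tlen]
  | cons c r ih => rw [List.cons_append, tlen, tlen, ih]; ring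

theorem psum_shift (step d : Int) : ∀ (xs : List Int) (a : Int),
    psum step (a + d) (xs.map (· + d)) = psum step a xs := by
  intro xs
  induction xs with
  | nil => intro a; simp [psum]
  | cons b r ih =>
    intro a
    rw [List.map_cons, psum, psum,
      show b + d - (a + d) = b - a from by ring, ih b]

theorem pyRange_nil_of_pos (a b s : Int) (hs : 0 < s) (h : ¬ a < b) :
    PySem.List.pyRange a b s = [] := by
  rw [PySem.List.pyRange_of_pos a b hs, if_neg h]
  simp

-- the chunks of a slicing pass partition what remains of the string
theorem tlen_slices (cs : List Char) (step : Int) (hs : 1 ≤ step) (a : Int) (ha : 0 ≤ a) :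
    tlen ((PySem.List.pyRange a (cs.length : Int) step).map
        (fun j => PySem.List.slice cs (some j) (some (j + step))))
      = max ((cs.length : Int) - a) 0 := by
  by_cases h : a < (cs.length : Int)
  · rw [pyRange_cons_of_pos a _ step (by omega) h, List.map_cons, tlen,
      tlen_slices cs step hs (a + step) (by omega),
      PySem.List.slice_toNat cs ha (by omega : (0:Int) ≤ a + step)]
    simp only [List.length_take, List.length_drop]
    omega
  · rw [pyRange_nil_of_pos _ _ _ (by omega) h, List.map_nil, tlen]
    omega
termination_by ((cs.length : Int) - a).toNat
decreasing_by omega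

-- every chunk except possibly the last has length `step`
theorem chunk_len (cs : List Char) (step : Int) (hs : 1 ≤ step) : ∀ (i : Nat) (a : Int),
    0 ≤ a → i + 1 < (PySem.List.pyRange a (cs.length : Int) step).length →
    ((((PySem.List.pyRange a (cs.length : Int) step).map
        (fun j => PySem.List.slice cs (some j) (some (j + step)))).getD i []).length : Int)
      = step := by
  intro i
  induction i with
  | zero =>
    intro a ha hi
    have h : a < (cs.length : Int) := by
      by_contra h
      rw [pyRange_nil_of_pos _ _ _ (by omega) h] at hi
      simp at hi
    rw [pyRange_cons_of_pos a _ step (by omega) h] at hi ⊢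
    have h2 : a + step < (cs.length : Int) := by
      by_contra h2
      rw [pyRange_nil_of_pos _ _ _ (by omega) h2] at hi
      simp at hi
    rw [List.map_cons, List.getD_cons_zero,
      PySem.List.slice_toNat cs ha (by omega : (0:Int) ≤ a + step)]
    simp only [List.length_take, List.length_drop]
    omega
  | succ i ih =>
    intro a ha hi
    have h : a < (cs.length : Int) := by
      by_contra h
      rw [pyRange_nil_of_pos _ _ _ (by omega) h] at hi
      simp at hi
    rw [pyRange_cons_of_pos a _ step (by omega) h] at hi ⊢
    rw [List.map_cons, List.getD_cons_succ]
    exact ih (a + step) (by omega) (by simpa using hi)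

-- the savings over the cut list account exactly for the gap between total and encoded length
theorem main_cut (stepI : Int) (l : List (List Char))
    (H : ∀ i, i + 1 < l.length → ((l.getD i []).length : Int) = stepI) :
    psum stepI (-1) ((mism l).map Int.ofNat ++ [(l.length : Int) - 1])
      = tlen l - compressedLen l := by
  match l with
  | [] => simp [mism, psum, tlen, compressedLen]
  | c :: rest =>
    rw [mism_cons, compressedLen]
    set r := leadRun c rest with hr
    have hrle : r ≤ rest.length := leadRun_le c rest
    by_cases hlt : r < rest.length
    · rw [if_pos hlt, List.map_cons, List.cons_append, psum]
      set l' := rest.drop r with hl'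
      have hlen' : l'.length = rest.length - r := by rw [hl', List.length_drop]
      have hcast : ((mism l').map (fun x => x + (r + 1))).map Int.ofNat
            ++ [((c :: rest).length : Int) - 1]
          = ((mism l').map Int.ofNat ++ [(l'.length : Int) - 1]).map
              (· + ((r : Int) + 1)) := by
        have e1 : ((mism l').map (fun x => x + (r + 1))).map Int.ofNat
            = ((mism l').map Int.ofNat).map (· + ((r : Int) + 1)) := by
          rw [List.map_map, List.map_map]
          apply List.map_congr_left
          intro x _
          simp [Function.comp, Int.ofNat_eq_natCast]
        have e2 : ([((c :: rest).length : Int) - 1] : List Int)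
            = ([(l'.length : Int) - 1]).map (· + ((r : Int) + 1)) := by
          simp only [List.map_cons, List.map_nil, List.length_cons]
          push_cast
          congr 1
          omega
        rw [e1, e2, ← List.map_append]
      have hIH : psum stepI ((r : Int)) (((mism l').map (fun x => x + (r + 1))).map Int.ofNat
            ++ [((c :: rest).length : Int) - 1])
          = tlen l' - compressedLen l' := by
        have hs' := psum_shift stepI ((r : Int) + 1)
          ((mism l').map Int.ofNat ++ [(l'.length : Int) - 1]) (-1)
        rw [show (-1 + ((r : Int) + 1)) = ((r : Int)) from by ring] at hs'
        rw [hcast, hs',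
          main_cut stepI l' (fun i hi => by
            rw [List.getD_eq_getElem?_getD, hl', List.getElem?_drop,
              ← List.getD_eq_getElem?_getD (l := rest)]
            have := H (r + i + 1) (by simp; omega)
            rwa [List.getD_cons_succ] at this)]
      rw [Int.ofNat_eq_natCast, show ((r : Int)) - -1 = (r : Int) + 1 from by ring, hIH]
      have htl : tlen (c :: rest) = (c.length : Int) + (r : Int) * (c.length : Int) + tlen l' := by
        rw [tlen, show rest = rest.take r ++ rest.drop r from (List.take_append_drop r rest).symm,
          tlen_append]
        rw [← hl', take_leadRun, ← hr, tlen_replicate]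
        ring
      rcases Nat.eq_zero_or_pos r with h0 | h1
      · rw [h0] at htl ⊢
        norm_num [encLen]
        rw [htl]
        push_cast
        ring
      · have hcl : (c.length : Int) = stepI := by
          have := H 0 (by simp; omega)
          rwa [List.getD_cons_zero] at this
        rw [if_pos (by omega), encLen, if_pos (by omega), htl, hcl]
        have hdig : ((PySem.Int.toChars ((r : Int) + 1)).length : Int)
            = ((PySem.Int.toChars (((r + 1 : Nat)) : Int)).length : Int) := by
          push_cast; ring_nf
        rw [hdig]
        push_cast
        ring
    · have hreq : r = rest.length := by omega
      rw [if_neg hlt, List.map_nil, List.nil_append, psum, psum]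
      have hdrop : rest.drop r = [] := by rw [hreq, List.drop_length]
      rw [hdrop, show compressedLen [] = 0 from by simp [compressedLen]]
      have htl : tlen (c :: rest) = (c.length : Int) + (r : Int) * (c.length : Int) := by
        rw [tlen, show rest = List.replicate r c from by
          rw [← take_leadRun c rest, ← hr, hreq, List.take_length], tlen_replicate, hreq]
      rcases Nat.eq_zero_or_pos r with h0 | h1
      · have hnil : rest = [] := List.eq_nil_of_length_eq_zero (by omega)
        subst hnil
        norm_num [encLen, tlen]
        exact fun h2 => absurd h2 (by omega)
      · have hcl : (c.length : Int) = stepI := by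
          have := H 0 (by simp; omega)
          rwa [List.getD_cons_zero] at this
        rw [if_pos (by simp; omega), encLen, if_pos (by omega), htl, hcl]
        have hdig : ((PySem.Int.toChars (((c :: rest).length : Int) - 1 - -1)).length : Int)
            = ((PySem.Int.toChars (((r + 1 : Nat)) : Int)).length : Int) := by
          congr 2
          simp [hreq]
        rw [hdig]
        simp only [List.length_cons, hreq]
        push_cast
        ring
termination_by l.length
decreasing_by simp

-- per-step agreement on the B side: n minus the savings is the run-encoded length
theorem step_agree_alt (cs : List Char) (step : Int) (h1 : 1 ≤ step) :
    (cs.length : Int) -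
      (let chunks := (PySem.List.pyRange 0 (cs.length : Int) step).map
          (fun i => PySem.List.slice cs (some i) (some (i + step)))
       let cuts : List Int := -1 ::
          (((PySem.List.pyRange 0 ((chunks.length : Int) - 1) 1).filter
            (fun t => decide (¬ PySem.List.pyGet? chunks t = PySem.List.pyGet? chunks (t + 1))))
           ++ [(chunks.length : Int) - 1])
       (((cuts.zip cuts.tail).filter (fun p => decide (p.2 - p.1 ≥ 2))).map
          (fun p => (p.2 - p.1 - 1) * step - ((PySem.Int.toChars (p.2 - p.1)).length : Int))).sum)
      = compressedLen ((PySem.List.pyRange 0 (cs.length : Int) step).map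
          (fun i => PySem.List.slice cs (some i) (some (i + step)))) := by
  set chunks := (PySem.List.pyRange 0 (cs.length : Int) step).map
      (fun i => PySem.List.slice cs (some i) (some (i + step))) with hchunks
  have hfilt : (PySem.List.pyRange 0 ((chunks.length : Int) - 1) 1).filter
        (fun t => decide (¬ PySem.List.pyGet? chunks t = PySem.List.pyGet? chunks (t + 1)))
      = (mism chunks).map Int.ofNat := by
    rw [PySem.List.pyRange_one, List.filter_map,
      show ((chunks.length : Int) - 1 - 0).toNat = chunks.length - 1 from by omega]
    rw [List.filter_congr (q := fun t => decide (¬ chunks[t]? = chunks[t + 1]?))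
      (fun k _ => by
        simp only [Function.comp_apply, zero_add, PySem.List.pyGet?_natCast]
        congr 2
        rw [show ((k : Int) + 1) = (((k + 1 : Nat)) : Int) from by push_cast; ring,
          PySem.List.pyGet?_natCast]), natFilt]
    apply List.map_congr_left
    intro x _
    simp [Int.ofNat_eq_natCast]
  simp only [List.tail_cons]
  rw [hfilt, zipsum,
    main_cut step chunks (fun i hi => by
      rw [hchunks]
      exact chunk_len cs step h1 i 0 (by omega)
        (by rw [hchunks, List.length_map] at hi; exact hi))]
  have htl : tlen chunks = (cs.length : Int) := by
    rw [hchunks, tlen_slices cs step h1 0 (by omega)]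
    omega
  rw [htl]
  ring

theorem solution_spec : Claim_equal_solution := by
  intro s _
  unfold Spec_solution solution solution_alt
  simp only []
  apply PySem.List.foldl_congr_mem
  intro acc step hmem
  have hm := PySem.List.mem_pyRange_one.mp hmem
  have hfd : PySem.Int.floordiv ((s.toList.length : Nat) : Int) 2
      = ((s.toList.length / 2 : Nat) : Int) := by
    exact_mod_cast PySem.Int.floordiv_natCast s.toList.length 2
  rw [hfd] at hm
  have h1 : 1 ≤ step := hm.1
  have h2 : step < (s.toList.length : Int) := by
    have := hm.2
    omega
  rw [step_agree s.toList step h1 h2]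
  rw [← step_agree_alt s.toList step h1]
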